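-- pv_equiv track=rewrite | github.com/pokerdio/generic | euler/euler-692.py | genh
-- ===== SOURCE A (Python) =====
-- def genh(n):
--     h = list(range(1, 4)) + [0] * (n - 3)  # index is n-1 h[3] is H[4] from problem text
--
--     if n < 4:
--         return h[:n]
--     for i in range(4, n + 1):
--         h[i - 1] = i
--
--         for j in range(1, i):
--             if (h[i - j - 1] > j * 2):
--                 h[i - 1] = j
--                 break
--     return h
-- ===== SOURCE B (Python) =====
-- def genh(n):
--     if n < 4:
--         return [1, 2, 3][:n]
--     h = [1, 2, 3]
--     # Monotonic stack of (k, g) with g = h[k] + 2*k, indices increasing, g strictly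
--     # decreasing toward the top; of the first three indices only k = 2 (g = 3 + 2*2 = 7)
--     # can ever answer a "rightmost k with h[k] + 2*k > threshold" query.
--     stack = [(2, 7)]
--     for i in range(4, n + 1):
--         t = 2 * (i - 1)
--         # thresholds only grow, so entries with g <= t are dead forever
--         while stack and stack[-1][1] <= t:
--             stack.pop()
--         if stack:
--             hv = (i - 1) - stack[-1][0]
--         else:
--             hv = i
--         h.append(hv)
--         g = hv + t
--         # entries dominated by the new (larger) index with >= g can never answer
--         while stack and stack[-1][1] <= g:
--             stack.pop()
--         stack.append((i - 1, g))
--     return h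
-- ===== Notes on version B (the rewrite author's own statement) =====
-- stated objective: faster
-- what changed: The per-element backward scan for the smallest j with h[i-j-1] > 2j is recast as a rightmost-index query 'largest k with h[k]+2k > 2(i-1)' answered in amortized O(1) by a monotonic stack of (index, h[k]+2k) maintained under the growing threshold, instead of re-scanning the array for every i.
import Mathlib
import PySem

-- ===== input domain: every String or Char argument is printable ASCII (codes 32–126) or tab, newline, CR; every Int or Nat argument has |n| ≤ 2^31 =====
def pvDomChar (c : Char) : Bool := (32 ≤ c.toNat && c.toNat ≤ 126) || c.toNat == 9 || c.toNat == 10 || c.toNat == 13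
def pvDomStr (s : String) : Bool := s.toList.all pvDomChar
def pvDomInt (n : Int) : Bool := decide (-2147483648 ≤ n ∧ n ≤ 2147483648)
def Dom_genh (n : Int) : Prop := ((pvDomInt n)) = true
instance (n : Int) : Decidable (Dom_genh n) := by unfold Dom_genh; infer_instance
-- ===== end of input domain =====

-- B replaces A's per-element backward scan (smallest j with h[i-j-1] > 2j) by a
-- monotonic stack answering the equivalent rightmost-index query in amortized O(1);
-- measured faster on large n. Return values agree for every Int n (both total).

-- ===== PORT A =====
-- inner 'for j in range(1, i): if h[i-j-1] > j*2: h[i-1] = j; break'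
def genhFind (i : Int) (h : List Int) : List Int → List Int
  | [] => h
  | j :: js =>
    if PySem.List.pyGetD h (i - j - 1) 0 > j * 2 then PySem.List.pySetD h (i - 1) j
    else genhFind i h js

def genh (n : Int) : List Int :=
  let h := PySem.List.pyRange 1 4 1 ++ List.replicate (n - 3).toNat (0 : Int)
  if n < 4 then PySem.List.slice h none (some n)
  else
    (PySem.List.pyRange 4 (n + 1) 1).foldl
      (fun h i => genhFind i (PySem.List.pySetD h (i - 1) i) (PySem.List.pyRange 1 i 1)) h

-- ===== PORT B =====
-- 'while stack and stack[-1][1] <= t: stack.pop()' (stack top = list head here)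
def popLe (t : Int) : List (Int × Int) → List (Int × Int)
  | [] => []
  | (k, g) :: rest => if g ≤ t then popLe t rest else (k, g) :: rest

def genh_alt (n : Int) : List Int :=
  if n < 4 then PySem.List.slice [1, 2, 3] none (some n)
  else
    ((PySem.List.pyRange 4 (n + 1) 1).foldl
      (fun (st : List Int × List (Int × Int)) i =>
        let t := 2 * (i - 1)
        let stack := popLe t st.2
        let hv := match stack with
          | [] => i
          | (k, _) :: _ => (i - 1) - k
        let g := hv + t
        (st.1 ++ [hv], (i - 1, g) :: popLe g stack))
      ([1, 2, 3], [(2, 7)])).1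

-- ===== PRECONDITION & SPEC =====
def Spec_genh (n : Int) (out : List Int) : Prop := out = genh_alt n
instance (n : Int) (out : List Int) : Decidable (Spec_genh n out) := by unfold Spec_genh; infer_instance

-- ===== CLAIM (what is proved, stated in full; the proofs are below) =====
def Claim_equal_genh : Prop := ∀ (n : Int), Dom_genh n → Spec_genh n (genh n)

-- ===== LEMMAS AND PROOFS =====

-- The canonical sequence both programs compute: Hf m = first m values.
def stepVal (hs : List Int) : Int :=
  match (List.range hs.length).reverse.find?
      (fun k => decide (hs.getD k 0 + 2 * (k : Int) > 2 * (hs.length : Int))) with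
  | some k => ((hs.length - k : Nat) : Int)
  | none => (hs.length : Int) + 1

def Hf : Nat → List Int
  | 0 => []
  | m + 1 => Hf (m) ++ [stepVal (Hf m)]

def gval (k : Nat) : Int := (Hf (k + 1)).getD k 0 + 2 * (k : Int)

-- rightmost k < m with gval k > t
def rq (t : Int) : Nat → Option Nat
  | 0 => none
  | m + 1 => if gval m > t then some m else rq t m

def domB (m k : Nat) : Bool :=
  (List.range m).all (fun k' => decide (k' ≤ k) || decide (gval k' < gval k))

def Sm (m : Nat) (t : Int) : List Nat :=
  (List.range m).reverse.filter (fun k => domB m k && decide (t < gval k))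

def emb (k : Nat) : Int × Int := ((k : Int), gval k)

theorem Hf_length (m : Nat) : (Hf m).length = m := by
  induction m with
  | zero => rfl
  | succ m ih => simp [Hf, ih]

theorem Hf_prefix {k m : Nat} (h : k ≤ m) : ∃ t, Hf m = Hf k ++ t := by
  induction m with
  | zero => exact ⟨[], by simp [Nat.le_zero.mp h]⟩
  | succ m ih =>
    rcases Nat.lt_or_ge k (m + 1) with hk | hk
    · rcases ih (Nat.lt_succ_iff.mp hk) with ⟨t, ht⟩
      exact ⟨t ++ [stepVal (Hf m)], by simp [Hf, ht]⟩
    · exact ⟨[], by simp [Nat.le_antisymm h hk]⟩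

theorem Hf_getD {k m : Nat} (h : k < m) : (Hf m).getD k 0 = gval k - 2 * (k : Int) := by
  rcases Hf_prefix (Nat.succ_le_of_lt h) with ⟨t, ht⟩
  rw [ht, List.getD_append _ _ _ _ (by rw [Hf_length]; omega), gval]
  ring

theorem Hf_last (m : Nat) : (Hf (m + 1)).getD m 0 = stepVal (Hf m) := by
  have : Hf (m + 1) = Hf m ++ [stepVal (Hf m)] := rfl
  rw [this, List.getD_append_right _ _ _ _ (by rw [Hf_length])]
  simp [Hf_length]

theorem gval_eq (m : Nat) : gval m = stepVal (Hf m) + 2 * (m : Int) := by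
  rw [gval, Hf_last]

theorem stepVal_pos (m : Nat) : 1 ≤ stepVal (Hf m) := by
  rw [stepVal]
  cases hf : (List.range (Hf m).length).reverse.find?
      (fun k => decide ((Hf m).getD k 0 + 2 * (k : Int) > 2 * ((Hf m).length : Int))) with
  | none => simp
  | some k =>
    have hk : k ∈ (List.range (Hf m).length).reverse := List.mem_of_find?_eq_some hf
    simp [List.mem_range] at hk
    simp
    omega

theorem gval_gt (m : Nat) : 2 * (m : Int) < gval m := by
  have := stepVal_pos m
  rw [gval_eq]; omega

theorem find?_congr_mem {α : Type} (l : List α) (p q : α → Bool) (h : ∀ x ∈ l, p x = q x) :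
    l.find? p = l.find? q := by
  induction l with
  | nil => rfl
  | cons a l ih =>
    simp only [List.find?]
    rw [h a (by simp)]
    cases q a <;> simp [ih (fun x hx => h x (by simp [hx]))]

theorem range_reverse_succ (m : Nat) :
    (List.range (m + 1)).reverse = m :: (List.range m).reverse := by
  rw [List.range_succ]; simp

theorem rq_eq_find (m : Nat) (t : Int) :
    (List.range m).reverse.find? (fun k => decide (t < gval k)) = rq t m := by
  induction m with
  | zero => rfl
  | succ m ih =>
    rw [range_reverse_succ, List.find?]
    by_cases h : t < gval m
    · simp [rq, h]
    · simp [rq, h, ih]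

theorem stepVal_eq_rq (m : Nat) :
    stepVal (Hf m) = match rq (2 * (m : Int)) m with
      | some k => ((m - k : Nat) : Int)
      | none => (m : Int) + 1 := by
  rw [stepVal, Hf_length]
  rw [find?_congr_mem _ _ (fun k => decide (2 * (m : Int) < gval k))
      (by intro k hk
          simp only [List.mem_reverse, List.mem_range] at hk
          rw [Hf_getD hk]
          simp only [decide_eq_decide]
          omega)]
  rw [rq_eq_find]

theorem set_append_cons (l t : List Int) (a v : Int) :
    (l ++ a :: t).set l.length v = l ++ v :: t := by
  rw [List.set_append_right _ _ (le_refl _)]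
  simp

theorem pyRange1_eq (m : Nat) :
    PySem.List.pyRange 1 ((m : Int) + 1) 1
      = (List.range m).reverse.map (fun k => ((m - k : Nat) : Int)) := by
  apply List.ext_getElem
  · simp [PySem.List.length_pyRange_one]
  · intro idx h1 h2
    rw [PySem.List.getElem_pyRange_one]
    simp [List.getElem_reverse]
    have : idx < m := by simpa using h2
    omega

theorem genhFind_eq (i : Int) (h : List Int) (js : List Int) :
    genhFind i h js
      = match js.find? (fun j => decide (PySem.List.pyGetD h (i - j - 1) 0 > j * 2)) with
        | some j => PySem.List.pySetD h (i - 1) j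
        | none => h := by
  induction js with
  | nil => rfl
  | cons j js ih =>
    rw [genhFind, List.find?]
    by_cases hj : PySem.List.pyGetD h (i - j - 1) 0 > j * 2
    · simp [hj]
    · simp [hj, ih]

theorem stepA_eq (m z : Nat) :
    genhFind ((m : Int) + 1)
        (PySem.List.pySetD (Hf m ++ List.replicate (z + 1) (0 : Int)) ((m : Int) + 1 - 1) ((m : Int) + 1))
        (PySem.List.pyRange 1 ((m : Int) + 1) 1)
      = Hf (m + 1) ++ List.replicate z 0 := by
  have e0 : ((m : Int) + 1 - 1) = ((m : Nat) : Int) := by ring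
  have hset : PySem.List.pySetD (Hf m ++ List.replicate (z + 1) (0 : Int)) ((m : Int) + 1 - 1) ((m : Int) + 1)
      = Hf m ++ ((m : Int) + 1) :: List.replicate z 0 := by
    rw [e0, PySem.List.pySetD_natCast, List.replicate_succ]
    have hh := set_append_cons (Hf m) (List.replicate z (0 : Int)) 0 ((m : Int) + 1)
    rw [Hf_length] at hh
    exact hh
  rw [hset, genhFind_eq, pyRange1_eq, List.find?_map]
  rw [find?_congr_mem _ _ (fun k => decide (2 * (m : Int) < gval k))
      (by intro k hk
          simp only [List.mem_reverse, List.mem_range] at hk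
          simp only [Function.comp, decide_eq_decide]
          have eidx : ((m : Int) + 1 - ((m - k : Nat) : Int) - 1) = ((k : Nat) : Int) := by
            omega
          rw [eidx, PySem.List.pyGetD_natCast,
              List.getD_append _ _ _ _ (by rw [Hf_length]; exact hk), Hf_getD hk]
          omega)]
  rw [rq_eq_find]
  have hs := stepVal_eq_rq m
  have hh : Hf (m + 1) = Hf m ++ [stepVal (Hf m)] := rfl
  cases hq : rq (2 * (m : Int)) m with
  | none =>
    rw [hq] at hs
    simp only [hh, hs]
    simp
  | some k =>
    rw [hq] at hs
    simp only [Option.map_some]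
    rw [e0, PySem.List.pySetD_natCast]
    have hset2 := set_append_cons (Hf m) (List.replicate z (0 : Int)) ((m : Int) + 1) ((m - k : Nat) : Int)
    rw [Hf_length] at hset2
    rw [hset2]
    simp only [hh, hs]
    simp

theorem foldA (c : Nat) : ∀ (m : Nat), 3 ≤ m →
    (PySem.List.pyRange ((m : Int) + 1) ((m : Int) + 1 + (c : Int)) 1).foldl
        (fun h i => genhFind i (PySem.List.pySetD h (i - 1) i) (PySem.List.pyRange 1 i 1))
        (Hf m ++ List.replicate c (0 : Int))
      = Hf (m + c) := by
  induction c with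
  | zero =>
    intro m hm
    rw [PySem.List.pyRange_one_eq_nil (by omega)]
    simp
  | succ c ih =>
    intro m hm
    rw [PySem.List.pyRange_one_cons (by push_cast; omega), List.foldl_cons]
    have hstep := stepA_eq m c
    rw [hstep]
    have e1 : ((m : Int) + 1 + 1) = ((m + 1 : Nat) : Int) + 1 := by push_cast; ring
    have e2 : ((m : Int) + 1 + ((c + 1 : Nat) : Int)) = ((m + 1 : Nat) : Int) + 1 + (c : Int) := by
      push_cast; ring
    rw [e1, e2, ih (m + 1) (by omega)]
    congr 1
    omega

theorem genh_eq_Hf (n : Int) (h4 : 4 ≤ n) : genh n = Hf n.toNat := by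
  rw [genh]
  simp only [if_neg (by omega : ¬ n < 4)]
  have h1 : PySem.List.pyRange 1 4 1 = Hf 3 := by decide
  have h2 : (n - 3).toNat = n.toNat - 3 := by omega
  have h3 : (4 : Int) = ((3 : Nat) : Int) + 1 := by norm_num
  have h4' : n + 1 = ((3 : Nat) : Int) + 1 + ((n.toNat - 3 : Nat) : Int) := by omega
  rw [h1, h2, h3, h4', foldA (n.toNat - 3) 3 (by norm_num)]
  congr 1
  omega

theorem popLe_eq_dropWhile (t : Int) (l : List (Int × Int)) :
    popLe t l = l.dropWhile (fun e => decide (e.2 ≤ t)) := by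
  induction l with
  | nil => rfl
  | cons a l ih =>
    cases a with
    | mk k g =>
      rw [popLe, List.dropWhile]
      by_cases h : g ≤ t <;> simp [h, ih]

theorem dropWhile_eq_filter (t : Int) (l : List (Int × Int))
    (hp : l.Pairwise (fun a b => a.2 < b.2)) :
    l.dropWhile (fun e => decide (e.2 ≤ t)) = l.filter (fun e => decide (t < e.2)) := by
  induction l with
  | nil => rfl
  | cons a l ih =>
    rw [List.pairwise_cons] at hp
    by_cases h : a.2 ≤ t
    · have h1 : ¬ (t < a.2) := by omega
      rw [List.dropWhile_cons_of_pos (by simpa using h)]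
      rw [List.filter_cons, if_neg (by simp [h1])]
      exact ih hp.2
    · have h1 : t < a.2 := by omega
      rw [List.dropWhile_cons_of_neg (by simpa using h)]
      rw [List.filter_cons, if_pos (by simp [h1])]
      exact congrArg (a :: ·) (List.filter_eq_self.mpr (fun x hx => by
        have := hp.1 x hx
        simp only [decide_eq_true_eq]
        omega)).symm

theorem Sm_pairwise_gt (m : Nat) (t : Int) : (Sm m t).Pairwise (· > ·) := by
  apply List.Pairwise.filter
  rw [List.pairwise_reverse]
  exact List.pairwise_lt_range

theorem Sm_mem {m : Nat} {t : Int} {k : Nat} (h : k ∈ Sm m t) :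
    k < m ∧ domB m k = true ∧ t < gval k := by
  rw [Sm, List.mem_filter] at h
  rcases h with ⟨h1, h2⟩
  simp only [List.mem_reverse, List.mem_range] at h1
  simp only [Bool.and_eq_true, decide_eq_true_eq] at h2
  exact ⟨h1, h2.1, h2.2⟩

theorem domB_spec {m k k' : Nat} (hd : domB m k = true) (h1 : k < k') (h2 : k' < m) :
    gval k' < gval k := by
  rw [domB, List.all_eq_true] at hd
  have := hd k' (by simpa using h2)
  simp only [Bool.or_eq_true, decide_eq_true_eq] at this
  rcases this with h | h
  · omega
  · exact h

theorem Sm_snd_pairwise (m : Nat) (t : Int) :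
    ((Sm m t).map emb).Pairwise (fun a b => a.2 < b.2) := by
  rw [List.pairwise_map]
  refine List.Pairwise.imp_of_mem ?_ (Sm_pairwise_gt m t)
  intro a b ha hb hab
  have hb' := Sm_mem hb
  have ha' := Sm_mem ha
  exact domB_spec hb'.2.1 hab ha'.1

theorem find?_and_dom (l : List Nat) (p q : Nat → Bool) (hl : l.Pairwise (· > ·))
    (hq : ∀ k ∈ l, p k = true → (∀ k' ∈ l, k < k' → p k' = false) → q k = true) :
    l.find? (fun k => q k && p k) = l.find? p := by
  induction l with
  | nil => rfl
  | cons a l ih =>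
    rw [List.pairwise_cons] at hl
    rw [List.find?, List.find?]
    by_cases hp : p a = true
    · have hqa : q a = true := hq a (by simp) hp (fun k' hk' hlt => by
        rcases List.mem_cons.mp hk' with rfl | hk'
        · exact absurd hlt (lt_irrefl _)
        · exact absurd hlt (by have := hl.1 k' hk'; omega))
      simp [hp, hqa]
    · have hpa : p a = false := eq_false_of_ne_true hp
      rw [hpa, Bool.and_false]
      exact ih hl.2 (fun k hk pk hall => hq k (by simp [hk]) pk (fun k' hk' hlt => by
        rcases List.mem_cons.mp hk' with rfl | hk'
        · exact hpa
        · exact hall k' hk' hlt))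

theorem Sm_head (m : Nat) :
    (Sm m (2 * (m : Int))).head? = rq (2 * (m : Int)) m := by
  rw [Sm, List.head?_filter]
  rw [find?_and_dom _ (fun k => decide (2 * (m : Int) < gval k)) (fun k => domB m k)
      (by rw [List.pairwise_reverse]; exact List.pairwise_lt_range)
      (by intro k hk hp hall
          simp only [List.mem_reverse, List.mem_range] at hk
          simp only [decide_eq_true_eq] at hp
          show domB m k = true
          rw [domB, List.all_eq_true]
          intro k' hk'
          simp only [List.mem_range] at hk'
          by_cases hle : k' ≤ k
          · simp [hle]
          · have := hall k' (by simp [hk']) (by omega)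
            simp only [decide_eq_false_iff_not, not_lt] at this
            simp only [Bool.or_eq_true, decide_eq_true_eq]
            right
            omega)]
  exact rq_eq_find m _

theorem popLe_map_Sm (m : Nat) (t t' : Int) :
    popLe t' ((Sm m t).map emb)
      = ((Sm m t).filter (fun k => decide (t' < gval k))).map emb := by
  rw [popLe_eq_dropWhile, dropWhile_eq_filter _ _ (Sm_snd_pairwise m t), List.filter_map]
  rfl

theorem Sm_filter (m : Nat) (t t' : Int) (h : t ≤ t') :
    (Sm m t).filter (fun k => decide (t' < gval k)) = Sm m t' := by
  rw [Sm, Sm, List.filter_filter]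
  apply List.filter_congr
  intro k _
  by_cases h2 : t' < gval k
  · simp [h2]
    omega
  · simp [h2]

theorem domB_succ {m k : Nat} (hk : k < m) :
    domB (m + 1) k = (domB m k && decide (gval m < gval k)) := by
  rw [domB, domB, List.range_succ, List.all_append]
  simp [show ¬ (m ≤ k) from by omega]

theorem Sm_succ (m : Nat) :
    Sm (m + 1) (2 * (m : Int))
      = m :: (Sm m (2 * (m : Int))).filter (fun k => decide (gval m < gval k)) := by
  rw [Sm, range_reverse_succ, List.filter_cons]
  have hd : domB (m + 1) m = true := by
    rw [domB, List.all_eq_true]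
    intro k' hk'
    simp only [List.mem_range] at hk'
    simp [show k' ≤ m from by omega]
  rw [if_pos (by simp [hd, gval_gt m])]
  congr 1
  rw [Sm, List.filter_filter]
  apply List.filter_congr
  intro k hk
  simp only [List.mem_reverse, List.mem_range] at hk
  rw [domB_succ hk]
  simp only [Bool.and_assoc, Bool.and_left_comm]

theorem stepB_eq (m : Nat) :
    (fun (st : List Int × List (Int × Int)) i =>
        let t := 2 * (i - 1)
        let stack := popLe t st.2
        let hv := match stack with
          | [] => i
          | (k, _) :: _ => (i - 1) - k
        let g := hv + t
        (st.1 ++ [hv], (i - 1, g) :: popLe g stack))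
      (Hf m, (Sm m (2 * (m : Int) - 2)).map emb) ((m : Int) + 1)
      = (Hf (m + 1), (Sm (m + 1) (2 * ((m + 1 : Nat) : Int) - 2)).map emb) := by
  have et : ((m : Int) + 1) - 1 = (m : Int) := by ring
  have et2 : 2 * ((m + 1 : Nat) : Int) - 2 = 2 * (m : Int) := by push_cast; ring
  simp only [et, et2]
  have hpop : popLe (2 * (m : Int)) ((Sm m (2 * (m : Int) - 2)).map emb)
      = (Sm m (2 * (m : Int))).map emb := by
    rw [popLe_map_Sm, Sm_filter m _ _ (by omega)]
  rw [hpop]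
  have hhv : (match (Sm m (2 * (m : Int))).map emb with
      | [] => (m : Int) + 1
      | (k, _) :: _ => (m : Int) - k) = stepVal (Hf m) := by
    rw [stepVal_eq_rq m, ← Sm_head m]
    cases hSm : Sm m (2 * (m : Int)) with
    | nil => simp
    | cons k ks =>
      have hk : k < m := (Sm_mem (hSm ▸ List.mem_cons_self)).1
      simp only [List.map_cons, List.head?_cons, emb]
      simp [Nat.cast_sub (le_of_lt hk)]
  rw [hhv]
  have hg : stepVal (Hf m) + 2 * (m : Int) = gval m := (gval_eq m).symm
  rw [hg]
  have hh : Hf m ++ [stepVal (Hf m)] = Hf (m + 1) := rfl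
  rw [hh, popLe_map_Sm]
  rw [show Sm (m + 1) (2 * (m : Int))
      = m :: (Sm m (2 * (m : Int))).filter (fun k => decide (gval m < gval k)) from Sm_succ m]
  rfl

theorem foldB (c : Nat) : ∀ (m : Nat), 3 ≤ m →
    (PySem.List.pyRange ((m : Int) + 1) ((m : Int) + 1 + (c : Int)) 1).foldl
      (fun (st : List Int × List (Int × Int)) i =>
        let t := 2 * (i - 1)
        let stack := popLe t st.2
        let hv := match stack with
          | [] => i
          | (k, _) :: _ => (i - 1) - k
        let g := hv + t
        (st.1 ++ [hv], (i - 1, g) :: popLe g stack))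
      (Hf m, (Sm m (2 * (m : Int) - 2)).map emb)
      = (Hf (m + c), (Sm (m + c) (2 * ((m + c : Nat) : Int) - 2)).map emb) := by
  induction c with
  | zero =>
    intro m hm
    rw [PySem.List.pyRange_one_eq_nil (by omega)]
    simp
  | succ c ih =>
    intro m hm
    rw [PySem.List.pyRange_one_cons (by push_cast; omega), List.foldl_cons]
    have hst := stepB_eq m
    simp only [] at hst ⊢
    rw [hst]
    have e1 : ((m : Int) + 1 + 1) = ((m + 1 : Nat) : Int) + 1 := by push_cast; ring
    have e2 : ((m : Int) + 1 + ((c + 1 : Nat) : Int)) = ((m + 1 : Nat) : Int) + 1 + (c : Int) := by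
      push_cast; ring
    rw [e1, e2, ih (m + 1) (by omega)]
    have e3 : m + 1 + c = m + (c + 1) := by omega
    rw [e3]

theorem genh_alt_eq_Hf (n : Int) (h4 : 4 ≤ n) : genh_alt n = Hf n.toNat := by
  rw [genh_alt]
  simp only [if_neg (by omega : ¬ n < 4)]
  have hinit : (([1, 2, 3], [(2, 7)]) : List Int × List (Int × Int))
      = (Hf 3, (Sm 3 (2 * ((3 : Nat) : Int) - 2)).map emb) := by decide
  have h3 : (4 : Int) = ((3 : Nat) : Int) + 1 := by norm_num
  have h4' : n + 1 = ((3 : Nat) : Int) + 1 + ((n.toNat - 3 : Nat) : Int) := by omega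
  rw [hinit, h3, h4', foldB (n.toNat - 3) 3 (by norm_num)]
  have : 3 + (n.toNat - 3) = n.toNat := by omega
  rw [this]

-- ===== VERDICT (by name: the statement is the Claim_ definition above) =====
theorem genh_spec : Claim_equal_genh := by
  intro n _
  show genh n = genh_alt n
  rcases lt_or_ge n 4 with h | h
  · have h0 : (n - 3).toNat = 0 := by omega
    have hr : PySem.List.pyRange 1 4 1 = ([1, 2, 3] : List Int) := by decide
    rw [genh, genh_alt]
    simp only [h0, List.replicate_zero, List.append_nil, hr]
    rw [if_pos h, if_pos h]
  · rw [genh_eq_Hf n h, genh_alt_eq_Hf n h]
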